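-- pv_equiv track=rewrite | github.com/unslop-xyz/noodles | src/archive/unslop/manifest.py | summarize_changes
-- ===== SOURCE A (Python) =====
-- def summarize_changes(
--     previous: dict[str, dict[str, object]], current: dict[str, dict[str, object]]
-- ) -> dict[str, list[str]]:
--     """Return a summary of additions, deletions, and modifications."""
--     previous_keys = set(previous)
--     current_keys = set(current)
--
--     added = sorted(current_keys - previous_keys)
--     deleted = sorted(previous_keys - current_keys)
--     modified = sorted(
--         path
--         for path in previous_keys & current_keys
--         if previous[path].get("hash") != current[path].get("hash")
--     )
--
--     return {"added": added, "deleted": deleted, "modified": modified}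
-- ===== SOURCE B (Python) =====
-- def summarize_changes(
--     previous: dict[str, dict[str, object]], current: dict[str, dict[str, object]]
-- ) -> dict[str, list[str]]:
--     """Return a summary of additions, deletions, and modifications."""
--     added, deleted, modified = [], [], []
--     for path in sorted(set(previous) | set(current)):
--         if path not in previous:
--             added.append(path)
--         elif path not in current:
--             deleted.append(path)
--         elif previous[path].get("hash") != current[path].get("hash"):
--             modified.append(path)
--     return {"added": added, "deleted": deleted, "modified": modified}
-- ===== Notes on version B (the rewrite author's own statement) =====
-- stated objective: alternative
-- what changed: Replaces A's three separate set-difference/intersection passes (each followed by its own sort) by one sort of the union of key sets and a single classifying loop over it that appends each path to added/deleted/modified, so each bucket comes out already sorted.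
import Mathlib
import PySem

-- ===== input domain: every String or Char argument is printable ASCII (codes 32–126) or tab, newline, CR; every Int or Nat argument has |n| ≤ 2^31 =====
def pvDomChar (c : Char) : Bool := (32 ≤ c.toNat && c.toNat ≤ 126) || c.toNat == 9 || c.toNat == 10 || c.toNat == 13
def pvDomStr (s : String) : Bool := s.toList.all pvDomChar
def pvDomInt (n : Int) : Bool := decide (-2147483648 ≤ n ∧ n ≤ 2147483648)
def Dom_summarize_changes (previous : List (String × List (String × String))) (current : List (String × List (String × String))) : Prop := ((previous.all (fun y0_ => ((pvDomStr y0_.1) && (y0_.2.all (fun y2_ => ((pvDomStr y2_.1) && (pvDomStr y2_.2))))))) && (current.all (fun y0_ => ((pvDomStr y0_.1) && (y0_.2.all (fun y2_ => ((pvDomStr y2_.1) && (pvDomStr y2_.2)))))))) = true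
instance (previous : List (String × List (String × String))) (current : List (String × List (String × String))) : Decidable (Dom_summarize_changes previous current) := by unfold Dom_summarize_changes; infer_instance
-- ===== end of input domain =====

-- B replaces A's three set-difference/intersection passes (each separately sorted) by one sort of
-- the union of keys and a single classifying loop over it; same output, same asymptotic cost.

-- ===== PORT A =====
-- A: previous_keys = set(previous); current_keys = set(current);
--    added = sorted(current_keys - previous_keys); deleted = sorted(previous_keys - current_keys);
--    modified = sorted(path for path in previous_keys & current_keys if previous[path].get("hash") != current[path].get("hash"))
--    previous[path] is only evaluated on keys of previous, so the total form (get? …).getD [] is exact there.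
def summarize_changes (previous : List (String × List (String × String))) (current : List (String × List (String × String))) : List (String × List String) :=
  let previous_keys : PySem.Set String := PySem.Set.ofList (PySem.Dict.keys (PySem.Dict.mk previous))
  let current_keys : PySem.Set String := PySem.Set.ofList (PySem.Dict.keys (PySem.Dict.mk current))
  let added := PySem.List.sorted (PySem.Set.diff current_keys previous_keys) (fun x => x)
  let deleted := PySem.List.sorted (PySem.Set.diff previous_keys current_keys) (fun x => x)
  let modified := PySem.List.sorted
    ((PySem.Set.inter previous_keys current_keys).filter (fun path =>
      PySem.Dict.get? (PySem.Dict.mk ((PySem.Dict.get? (PySem.Dict.mk previous) path).getD [])) "hash"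
        != PySem.Dict.get? (PySem.Dict.mk ((PySem.Dict.get? (PySem.Dict.mk current) path).getD [])) "hash"))
    (fun x => x)
  [("added", added), ("deleted", deleted), ("modified", modified)]

-- ===== PORT B =====
-- B: one loop over sorted(set(previous) | set(current)) classifying each path into the three buckets.
def summarize_changes_alt (previous : List (String × List (String × String))) (current : List (String × List (String × String))) : List (String × List String) :=
  let paths := PySem.List.sorted
    (PySem.Set.union (PySem.Set.ofList (PySem.Dict.keys (PySem.Dict.mk previous)))
                     (PySem.Set.ofList (PySem.Dict.keys (PySem.Dict.mk current)))) (fun x => x)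
  let acc := paths.foldl
    (fun (acc : List String × List String × List String) path =>
      if !PySem.Dict.contains (PySem.Dict.mk previous) path then (acc.1 ++ [path], acc.2.1, acc.2.2)
      else if !PySem.Dict.contains (PySem.Dict.mk current) path then (acc.1, acc.2.1 ++ [path], acc.2.2)
      else if PySem.Dict.get? (PySem.Dict.mk ((PySem.Dict.get? (PySem.Dict.mk previous) path).getD [])) "hash"
              != PySem.Dict.get? (PySem.Dict.mk ((PySem.Dict.get? (PySem.Dict.mk current) path).getD [])) "hash"
        then (acc.1, acc.2.1, acc.2.2 ++ [path])
      else acc)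
    ([], [], [])
  [("added", acc.1), ("deleted", acc.2.1), ("modified", acc.2.2)]

-- ===== PRECONDITION & SPEC =====
def Spec_summarize_changes (previous : List (String × List (String × String))) (current : List (String × List (String × String))) (out : List (String × List String)) : Prop := out = summarize_changes_alt previous current
instance (previous : List (String × List (String × String))) (current : List (String × List (String × String))) (out : List (String × List String)) : Decidable (Spec_summarize_changes previous current out) := by unfold Spec_summarize_changes; infer_instance

-- ===== CLAIM (what is proved, stated in full; the proofs are below) =====
def Claim_equal_summarize_changes : Prop := ∀ (previous : List (String × List (String × String))) (current : List (String × List (String × String))), Dom_summarize_changes previous current → Spec_summarize_changes previous current (summarize_changes previous current)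

-- ===== LEMMAS AND PROOFS =====

-- B's classifying fold, in closed form: three filters of the traversed list.
theorem pvFold (previous current : List (String × List (String × String))) :
    ∀ (xs : List String) (a b c : List String),
    xs.foldl
      (fun (acc : List String × List String × List String) path =>
        if !PySem.Dict.contains (PySem.Dict.mk previous) path then (acc.1 ++ [path], acc.2.1, acc.2.2)
        else if !PySem.Dict.contains (PySem.Dict.mk current) path then (acc.1, acc.2.1 ++ [path], acc.2.2)
        else if PySem.Dict.get? (PySem.Dict.mk ((PySem.Dict.get? (PySem.Dict.mk previous) path).getD [])) "hash"
                != PySem.Dict.get? (PySem.Dict.mk ((PySem.Dict.get? (PySem.Dict.mk current) path).getD [])) "hash"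
          then (acc.1, acc.2.1, acc.2.2 ++ [path])
        else acc)
      (a, b, c)
    = (a ++ xs.filter (fun path => !PySem.Dict.contains (PySem.Dict.mk previous) path),
       b ++ xs.filter (fun path => PySem.Dict.contains (PySem.Dict.mk previous) path
                                   && !PySem.Dict.contains (PySem.Dict.mk current) path),
       c ++ xs.filter (fun path => PySem.Dict.contains (PySem.Dict.mk previous) path
                                   && PySem.Dict.contains (PySem.Dict.mk current) path
                                   && (PySem.Dict.get? (PySem.Dict.mk ((PySem.Dict.get? (PySem.Dict.mk previous) path).getD [])) "hash"
                                       != PySem.Dict.get? (PySem.Dict.mk ((PySem.Dict.get? (PySem.Dict.mk current) path).getD [])) "hash"))) := by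
  intro xs
  induction xs with
  | nil => intro a b c; simp
  | cons x xs ih =>
    intro a b c
    rw [List.foldl_cons, List.filter_cons, List.filter_cons, List.filter_cons]
    simp only []
    by_cases hp : (!PySem.Dict.contains (PySem.Dict.mk previous) x) = true
    · rw [if_pos hp, ih]
      have hp' : PySem.Dict.contains (PySem.Dict.mk previous) x = false := by simpa using hp
      simp [hp']
    · have hp2 : PySem.Dict.contains (PySem.Dict.mk previous) x = true := by simpa using hp
      rw [if_neg hp]
      by_cases hq : (!PySem.Dict.contains (PySem.Dict.mk current) x) = true
      · rw [if_pos hq, ih]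
        have hq' : PySem.Dict.contains (PySem.Dict.mk current) x = false := by simpa using hq
        simp [hp2, hq']
      · have hq2 : PySem.Dict.contains (PySem.Dict.mk current) x = true := by simpa using hq
        rw [if_neg hq]
        by_cases hr : (PySem.Dict.get? (PySem.Dict.mk ((PySem.Dict.get? (PySem.Dict.mk previous) x).getD [])) "hash"
            != PySem.Dict.get? (PySem.Dict.mk ((PySem.Dict.get? (PySem.Dict.mk current) x).getD [])) "hash") = true
        · rw [if_pos hr, ih]
          simp [hp2, hq2, hr]
        · rw [if_neg hr, ih]
          have hr' : (PySem.Dict.get? (PySem.Dict.mk ((PySem.Dict.get? (PySem.Dict.mk previous) x).getD [])) "hash"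
              != PySem.Dict.get? (PySem.Dict.mk ((PySem.Dict.get? (PySem.Dict.mk current) x).getD [])) "hash") = false := by
            simpa using hr
          simp [hp2, hq2, hr']

-- sorted over a duplicate-free collection equals the corresponding filter of a sorted superset.
theorem pv_sorted_filter (s xs : List String) (p : String → Bool)
    (hs : s.Nodup) (hxs : xs.Nodup)
    (hmem : ∀ x, x ∈ s ↔ x ∈ xs ∧ p x = true) :
    PySem.List.sorted s (fun x => x) = (PySem.List.sorted xs (fun x => x)).filter p := by
  have hperm : (PySem.List.sorted xs (fun x => x)).Perm xs := PySem.List.sorted_perm xs (fun x => x) false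
  have hndx : (PySem.List.sorted xs (fun x => x)).Nodup := hperm.nodup_iff.mpr hxs
  have hlt : (PySem.List.sorted xs (fun x => x)).Pairwise (· < ·) := by
    have hle := PySem.List.sorted_pairwise xs (fun x => x)
    exact (hle.and hndx).imp (fun h => lt_of_le_of_ne h.1 h.2)
  apply PySem.List.sorted_eq_of_perm_of_pairwise_lt
  · apply List.perm_of_nodup_nodup_toFinset_eq (hndx.filter p) hs
    ext x
    simp only [List.mem_toFinset, List.mem_filter, hperm.mem_iff, hmem x]
  · exact hlt.filter p

theorem ports_eq (previous current : List (String × List (String × String))) :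
    summarize_changes previous current = summarize_changes_alt previous current := by
  have h1 : PySem.List.sorted
      (PySem.Set.diff (PySem.Set.ofList (PySem.Dict.keys (PySem.Dict.mk current)))
        (PySem.Set.ofList (PySem.Dict.keys (PySem.Dict.mk previous)))) (fun x => x)
      = (PySem.List.sorted
          (PySem.Set.union (PySem.Set.ofList (PySem.Dict.keys (PySem.Dict.mk previous)))
            (PySem.Set.ofList (PySem.Dict.keys (PySem.Dict.mk current)))) (fun x => x)).filter
          (fun path => !PySem.Dict.contains (PySem.Dict.mk previous) path) := by
    apply pv_sorted_filter
    · exact (PySem.Set.nodup_ofList _).filter _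
    · exact PySem.Set.nodup_union _ _ (PySem.Set.nodup_ofList _)
    · intro x
      simp only [PySem.Set.mem_diff, PySem.Set.mem_union, PySem.Set.mem_ofList,
        ← PySem.Dict.contains_iff_mem_keys, Bool.not_eq_true', Bool.eq_false_iff, ne_eq]
      tauto
  have h2 : PySem.List.sorted
      (PySem.Set.diff (PySem.Set.ofList (PySem.Dict.keys (PySem.Dict.mk previous)))
        (PySem.Set.ofList (PySem.Dict.keys (PySem.Dict.mk current)))) (fun x => x)
      = (PySem.List.sorted
          (PySem.Set.union (PySem.Set.ofList (PySem.Dict.keys (PySem.Dict.mk previous)))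
            (PySem.Set.ofList (PySem.Dict.keys (PySem.Dict.mk current)))) (fun x => x)).filter
          (fun path => PySem.Dict.contains (PySem.Dict.mk previous) path
                       && !PySem.Dict.contains (PySem.Dict.mk current) path) := by
    apply pv_sorted_filter
    · exact (PySem.Set.nodup_ofList _).filter _
    · exact PySem.Set.nodup_union _ _ (PySem.Set.nodup_ofList _)
    · intro x
      simp only [PySem.Set.mem_diff, PySem.Set.mem_union, PySem.Set.mem_ofList,
        ← PySem.Dict.contains_iff_mem_keys, Bool.and_eq_true, Bool.not_eq_true',
        Bool.eq_false_iff, ne_eq]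
      tauto
  have h3 : PySem.List.sorted
      ((PySem.Set.inter (PySem.Set.ofList (PySem.Dict.keys (PySem.Dict.mk previous)))
          (PySem.Set.ofList (PySem.Dict.keys (PySem.Dict.mk current)))).filter (fun path =>
        PySem.Dict.get? (PySem.Dict.mk ((PySem.Dict.get? (PySem.Dict.mk previous) path).getD [])) "hash"
          != PySem.Dict.get? (PySem.Dict.mk ((PySem.Dict.get? (PySem.Dict.mk current) path).getD [])) "hash")) (fun x => x)
      = (PySem.List.sorted
          (PySem.Set.union (PySem.Set.ofList (PySem.Dict.keys (PySem.Dict.mk previous)))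
            (PySem.Set.ofList (PySem.Dict.keys (PySem.Dict.mk current)))) (fun x => x)).filter
          (fun path => PySem.Dict.contains (PySem.Dict.mk previous) path
                       && PySem.Dict.contains (PySem.Dict.mk current) path
                       && (PySem.Dict.get? (PySem.Dict.mk ((PySem.Dict.get? (PySem.Dict.mk previous) path).getD [])) "hash"
                           != PySem.Dict.get? (PySem.Dict.mk ((PySem.Dict.get? (PySem.Dict.mk current) path).getD [])) "hash")) := by
    apply pv_sorted_filter
    · exact ((PySem.Set.nodup_ofList _).filter _).filter _
    · exact PySem.Set.nodup_union _ _ (PySem.Set.nodup_ofList _)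
    · intro x
      simp only [List.mem_filter, PySem.Set.mem_inter, PySem.Set.mem_union, PySem.Set.mem_ofList,
        ← PySem.Dict.contains_iff_mem_keys, Bool.and_eq_true]
      tauto
  simp only [summarize_changes, summarize_changes_alt, pvFold, List.nil_append]
  rw [h1, h2, h3]

-- ===== VERDICT (by name: the statement is the Claim_ definition above) =====
theorem summarize_changes_spec : Claim_equal_summarize_changes := by
  intro previous current _
  exact ports_eq previous current
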